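-- pv_equiv track=rewrite | github.com/Zhaopudark/Mri-Trans-Gan | utils/operations/data_op.py | alloc_ones_from_center
-- ===== SOURCE A (Python) =====
-- from typing import Any,Literal
--
-- def alloc_ones_from_center(total:int,length:int,mode:Literal['min_interval','max_interval']):
--     assert 0<=total<=length
--     if total>=(length/2):
--         reverse_flag = True
--         total = length-total
--     else:
--         reverse_flag = False
--     buf = [0,]*length
--     if total >=1 :
--         if total==1:
--             interval = 0
--         else:
--             interval_buf = [i for i in range(length) if (i*(total-1)+1<=length)and((i+1)*(total-1)+1>length or i*total+1>length)]
--             if mode == 'max_interval':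
--                 interval = max(interval_buf)
--             elif mode == 'min_interval':
--                 interval = min(interval_buf)
--         inner_length = interval*(total-1)+1
--         left_length = (length-inner_length)//2 # left_length == begin_index
--         for i in range(total):
--             buf[left_length+i*interval] = 1
--     return [1-item for item in buf] if reverse_flag else buf
-- ===== SOURCE B (Python) =====
-- def alloc_ones_from_center(total, length, mode):
--     assert 0 <= total <= length
--     reverse = 2 * total >= length
--     t = length - total if reverse else total
--     if t <= 1:
--         interval = 0
--     elif mode == 'max_interval':
--         interval = (length - 1) // (t - 1)
--     else:  # 'min_interval'
--         interval = min((length - 1) // t + 1, (length - 1) // (t - 1))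
--     inner = interval * (t - 1) + 1 if t >= 1 else 0
--     left = (length - inner) // 2
--     ones = {left + k * interval for k in range(t)}
--     return [int((j in ones) != reverse) for j in range(length)]
-- ===== Notes on version B (the rewrite author's own statement) =====
-- stated objective: simpler
-- what changed: Replaces the O(length) scan-plus-max/min search for the spacing with a closed-form floor-division formula, and replaces the zero-buffer mutation loop plus separate flip pass with a single comprehension testing membership in the set of one-positions (flip folded into the test).
import Mathlib
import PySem

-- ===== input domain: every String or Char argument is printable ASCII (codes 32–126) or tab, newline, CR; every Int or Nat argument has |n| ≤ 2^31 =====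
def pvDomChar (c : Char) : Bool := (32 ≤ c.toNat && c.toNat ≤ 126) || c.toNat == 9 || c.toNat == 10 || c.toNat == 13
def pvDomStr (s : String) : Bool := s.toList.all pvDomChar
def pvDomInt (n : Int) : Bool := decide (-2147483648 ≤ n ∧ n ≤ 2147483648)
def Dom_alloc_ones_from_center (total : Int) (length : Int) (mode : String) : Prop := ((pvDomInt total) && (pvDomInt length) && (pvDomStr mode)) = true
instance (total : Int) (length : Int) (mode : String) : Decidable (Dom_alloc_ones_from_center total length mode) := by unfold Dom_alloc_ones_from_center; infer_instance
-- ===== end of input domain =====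

-- B replaces A's O(length) scan for the spacing by a closed-form floor-division formula and builds the
-- output by a set-membership comprehension (flip folded in) instead of a mutation loop plus a flip pass.

-- ===== PORT A =====
-- 'assert 0<=total<=length' raises outside Pre_. Python's 'total>=(length/2)' is an exact int/float
-- comparison for |length| ≤ 2^31, hence equals '2*total ≥ length'. The in-branch reassignment of
-- 'total' / 'reverse_flag' is written as one conditional pair.
def alloc_ones_from_center (total : Int) (length : Int) (mode : String) : List Int :=
  let reverse_flag : Bool := decide (2 * total ≥ length)
  let total2 : Int := if reverse_flag then length - total else total
  let buf : List Int := PySem.List.pyRepeat [0] length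
  let buf : List Int :=
    if total2 ≥ 1 then
      let interval : Int :=
        if total2 = 1 then 0
        else
          let interval_buf : List Int := (PySem.List.pyRange 0 length 1).filter
            (fun i => decide (i * (total2 - 1) + 1 ≤ length) &&
              (decide ((i + 1) * (total2 - 1) + 1 > length) || decide (i * total2 + 1 > length)))
          if mode = "max_interval" then (PySem.List.max? interval_buf (fun x => x)).getD 0
          else if mode = "min_interval" then (PySem.List.min? interval_buf (fun x => x)).getD 0
          else 0  -- Python: UnboundLocalError here; excluded by Pre_
      let inner_length : Int := interval * (total2 - 1) + 1
      let left_length : Int := PySem.Int.floordiv (length - inner_length) 2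
      (PySem.List.pyRange 0 total2 1).foldl
        (fun b i => PySem.List.pySetD b (left_length + i * interval) 1) buf
    else buf
  if reverse_flag then buf.map (fun item => 1 - item) else buf

-- ===== PORT B =====
def alloc_ones_from_center_alt (total : Int) (length : Int) (mode : String) : List Int :=
  let reverse : Bool := decide (2 * total ≥ length)
  let t : Int := if reverse then length - total else total
  let interval : Int :=
    if t ≤ 1 then 0
    else if mode = "max_interval" then PySem.Int.floordiv (length - 1) (t - 1)
    else min (PySem.Int.floordiv (length - 1) t + 1) (PySem.Int.floordiv (length - 1) (t - 1))
  let inner : Int := if t ≥ 1 then interval * (t - 1) + 1 else 0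
  let left : Int := PySem.Int.floordiv (length - inner) 2
  let ones : PySem.Set Int :=
    PySem.Set.ofList ((PySem.List.pyRange 0 t 1).map (fun k => left + k * interval))
  (PySem.List.pyRange 0 length 1).map
    (fun j => if (decide (j ∈ ones)) != reverse then (1 : Int) else 0)

-- ===== PRECONDITION & SPEC =====
-- Pre_ excludes exactly the inputs where A raises: the assert 0<=total<=length (AssertionError), and a
-- mode other than the two literals when the effective count min(total,length-total) is ≥ 2
-- (UnboundLocalError on 'interval').
def Pre_alloc_ones_from_center (total : Int) (length : Int) (mode : String) : Prop :=
  0 ≤ total ∧ total ≤ length ∧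
    (2 ≤ min total (length - total) → mode = "max_interval" ∨ mode = "min_interval")
instance (total : Int) (length : Int) (mode : String) : Decidable (Pre_alloc_ones_from_center total length mode) := by unfold Pre_alloc_ones_from_center; infer_instance

def pvWitness_alloc_ones_from_center : Int × Int × String := (2, 7, "min_interval")

def Spec_alloc_ones_from_center (total : Int) (length : Int) (mode : String) (out : List Int) : Prop := out = alloc_ones_from_center_alt total length mode
instance (total : Int) (length : Int) (mode : String) (out : List Int) : Decidable (Spec_alloc_ones_from_center total length mode out) := by unfold Spec_alloc_ones_from_center; infer_instance

-- ===== CLAIM (what is proved, stated in full; the proofs are below) =====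
def Claim_equal_alloc_ones_from_center : Prop := ∀ (total : Int) (length : Int) (mode : String), Dom_alloc_ones_from_center total length mode → Pre_alloc_ones_from_center total length mode → Spec_alloc_ones_from_center total length mode (alloc_ones_from_center total length mode)

-- ===== LEMMAS AND PROOFS =====

-- Membership in A's interval_buf is an integer interval [lo, hi].
lemma mem_interval_filter (L t i : Int) (ht : 2 ≤ t) (hL : 2 * t ≤ L) :
    (i ∈ (PySem.List.pyRange 0 L 1).filter
      (fun i => decide (i * (t - 1) + 1 ≤ L) &&
        (decide ((i + 1) * (t - 1) + 1 > L) || decide (i * t + 1 > L)))) ↔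
    (min (PySem.Int.floordiv (L - 1) t + 1) (PySem.Int.floordiv (L - 1) (t - 1)) ≤ i ∧
      i ≤ PySem.Int.floordiv (L - 1) (t - 1)) := by
  have hb1 : (0:Int) < t - 1 := by omega
  have hb2 : (0:Int) < t := by omega
  have e1 : ∀ q : Int, (q ≤ PySem.Int.floordiv (L - 1) (t - 1)) ↔ q * (t - 1) ≤ L - 1 :=
    fun q => PySem.Int.le_floordiv_iff_mul_le hb1
  have e2 : ∀ q : Int, (q ≤ PySem.Int.floordiv (L - 1) t) ↔ q * t ≤ L - 1 :=
    fun q => PySem.Int.le_floordiv_iff_mul_le hb2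
  have hhi0 : 0 ≤ PySem.Int.floordiv (L - 1) (t - 1) := by
    rw [e1 0]; nlinarith
  have hlo0 : 0 ≤ PySem.Int.floordiv (L - 1) t := by
    rw [e2 0]; nlinarith
  have hhiL : PySem.Int.floordiv (L - 1) (t - 1) < L := by
    have := (e1 L).symm
    by_contra h
    have hLe : L ≤ PySem.Int.floordiv (L - 1) (t - 1) := by omega
    have : L * (t - 1) ≤ L - 1 := by
      have h2 := (e1 (PySem.Int.floordiv (L - 1) (t - 1))).mp le_rfl
      nlinarith
    nlinarith
  rw [List.mem_filter, PySem.List.mem_pyRange_one]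
  simp only [Bool.and_eq_true, Bool.or_eq_true, decide_eq_true_eq]
  constructor
  · rintro ⟨⟨h0, hL'⟩, h1, h2 | h2⟩
    · have hhi : i ≤ PySem.Int.floordiv (L - 1) (t - 1) := by rw [e1]; omega
      have : ¬ (i + 1 ≤ PySem.Int.floordiv (L - 1) (t - 1)) := by rw [e1]; omega
      constructor
      · omega
      · exact hhi
    · have hhi : i ≤ PySem.Int.floordiv (L - 1) (t - 1) := by rw [e1]; omega
      have : ¬ (i ≤ PySem.Int.floordiv (L - 1) t) := by rw [e2]; omega
      exact ⟨by omega, hhi⟩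
  · rintro ⟨hlo, hhi⟩
    have hi1 : i * (t - 1) ≤ L - 1 := (e1 i).mp hhi
    refine ⟨⟨by omega, by omega⟩, by omega, ?_⟩
    by_cases hc : PySem.Int.floordiv (L - 1) t + 1 ≤ i
    · right
      have : ¬ (i ≤ PySem.Int.floordiv (L - 1) t) := by omega
      rw [e2] at this; omega
    · left
      have : i = PySem.Int.floordiv (L - 1) (t - 1) := by omega
      have h2 : ¬ (i + 1 ≤ PySem.Int.floordiv (L - 1) (t - 1)) := by omega
      rw [e1] at h2; omega

lemma interval_max_eq (L t : Int) (ht : 2 ≤ t) (hL : 2 * t ≤ L) :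
    PySem.List.max? ((PySem.List.pyRange 0 L 1).filter
      (fun i => decide (i * (t - 1) + 1 ≤ L) &&
        (decide ((i + 1) * (t - 1) + 1 > L) || decide (i * t + 1 > L)))) (fun x => x)
    = some (PySem.Int.floordiv (L - 1) (t - 1)) := by
  set hi := PySem.Int.floordiv (L - 1) (t - 1) with hhi
  set F : List Int := (PySem.List.pyRange 0 L 1).filter
      (fun i => decide (i * (t - 1) + 1 ≤ L) &&
        (decide ((i + 1) * (t - 1) + 1 > L) || decide (i * t + 1 > L))) with hF
  have hmem : hi ∈ F := by
    rw [hF, mem_interval_filter L t hi ht hL]; exact ⟨min_le_right _ _, le_rfl⟩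
  rcases h : PySem.List.max? F (fun x : Int => x) with _ | m
  · rw [PySem.List.max?_eq_none_iff] at h
    rw [h] at hmem; simp at hmem
  · have hmmem := PySem.List.max?_mem h
    have hmax := PySem.List.max?_isMax h hi hmem
    rw [hF, mem_interval_filter L t m ht hL] at hmmem
    exact congrArg some (le_antisymm hmmem.2 hmax)

lemma interval_min_eq (L t : Int) (ht : 2 ≤ t) (hL : 2 * t ≤ L) :
    PySem.List.min? ((PySem.List.pyRange 0 L 1).filter
      (fun i => decide (i * (t - 1) + 1 ≤ L) &&
        (decide ((i + 1) * (t - 1) + 1 > L) || decide (i * t + 1 > L)))) (fun x => x)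
    = some (min (PySem.Int.floordiv (L - 1) t + 1) (PySem.Int.floordiv (L - 1) (t - 1))) := by
  set lo := min (PySem.Int.floordiv (L - 1) t + 1) (PySem.Int.floordiv (L - 1) (t - 1)) with hlo
  set F : List Int := (PySem.List.pyRange 0 L 1).filter
      (fun i => decide (i * (t - 1) + 1 ≤ L) &&
        (decide ((i + 1) * (t - 1) + 1 > L) || decide (i * t + 1 > L))) with hF
  have hmem : lo ∈ F := by
    rw [hF, mem_interval_filter L t lo ht hL]; exact ⟨le_rfl, min_le_right _ _⟩
  rcases h : PySem.List.min? F (fun x : Int => x) with _ | m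
  · rw [PySem.List.min?_eq_none_iff] at h
    rw [h] at hmem; simp at hmem
  · have hmmem := PySem.List.min?_mem h
    have hmin := PySem.List.min?_isMin h lo hmem
    rw [hF, mem_interval_filter L t m ht hL] at hmmem
    exact congrArg some (le_antisymm hmin hmmem.1)

-- A's placement loop over a zero buffer computes the 0/1 indicator of the set of one-positions.
lemma fold_set_eq_indicator (L left interval : Int) (hleft : 0 ≤ left) (hint : 0 ≤ interval)
    (n : Nat) :
    (PySem.List.pyRange 0 n 1).foldl
      (fun b i => PySem.List.pySetD b (left + i * interval) 1) (PySem.List.pyRepeat [0] L)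
    = (PySem.List.pyRange 0 L 1).map
        (fun j => if j ∈ (PySem.List.pyRange 0 n 1).map (fun k => left + k * interval)
          then (1 : Int) else 0) := by
  induction n with
  | zero =>
    simp only [Nat.cast_zero, PySem.List.pyRange_one_eq_nil le_rfl, List.foldl_nil,
      List.map_nil, List.not_mem_nil, if_false]
    rw [PySem.List.pyRepeat_singleton, List.map_const']
    simp [PySem.List.length_pyRange_one]
  | succ n ih =>
    have hstep : PySem.List.pyRange 0 ((n + 1 : Nat) : Int) 1
        = PySem.List.pyRange 0 (n : Nat) 1 ++ [(n : Int)] := by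
      push_cast
      exact PySem.List.pyRange_one_succ_right (by positivity)
    rw [hstep, List.foldl_append, List.foldl_cons, List.foldl_nil, ih]
    set p : Int := left + (n : Int) * interval with hp
    have hp0 : 0 ≤ p := by positivity
    rw [PySem.List.pySetD_of_nonneg _ _ hp0]
    apply List.ext_getElem
    · simp
    · intro k hk1 hk2
      rw [List.getElem_set]
      simp only [List.getElem_map, PySem.List.getElem_pyRange_one, zero_add, List.map_append,
        List.map_cons, List.map_nil, List.mem_append, List.mem_cons, List.not_mem_nil, or_false]
      by_cases hkp : p.toNat = k
      · have hkeq : (k : Int) = left + (n : Int) * interval := by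
          have : (k : Int) = p := by omega
          rw [this, hp]
        rw [if_pos hkp, if_pos (Or.inr hkeq)]
      · have hkne : ¬ ((k : Int) = left + (n : Int) * interval) := by
          rw [← hp]; omega
        rw [if_neg hkp]
        by_cases hmem : (k : Int) ∈ List.map (fun k => left + k * interval) (PySem.List.pyRange 0 (n : Int) 1)
        · rw [if_pos hmem, if_pos (Or.inl hmem)]
        · rw [if_neg hmem, if_neg (by tauto)]

-- Folding the reverse pass into the membership test.
lemma flip_eq_membership (posList : List Int) (L : Int) (R : Bool) :
    (if R then ((PySem.List.pyRange 0 L 1).map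
        (fun j => if j ∈ posList then (1 : Int) else 0)).map (fun item => 1 - item)
      else (PySem.List.pyRange 0 L 1).map (fun j => if j ∈ posList then (1 : Int) else 0))
    = (PySem.List.pyRange 0 L 1).map
        (fun j => if (decide (j ∈ PySem.Set.ofList posList)) != R then (1 : Int) else 0) := by
  cases R with
  | false =>
    simp only [if_neg (Bool.false_ne_true ∘ congrArg id), Bool.bne_false]
    apply List.map_congr_left
    intro j _
    by_cases hj : j ∈ posList <;> simp [hj, PySem.Set.mem_ofList]
  | true =>
    simp only [List.map_map, Bool.bne_true]
    apply List.map_congr_left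
    intro j _
    by_cases hj : j ∈ posList <;> simp [hj, PySem.Set.mem_ofList]

-- ===== VERDICT (by name: the statement is the Claim_ definition above) =====
theorem alloc_ones_from_center_spec : Claim_equal_alloc_ones_from_center := by
  intro total length mode _ hpre
  obtain ⟨h0, h1, hmode⟩ := hpre
  unfold Spec_alloc_ones_from_center
  simp only [alloc_ones_from_center, alloc_ones_from_center_alt]
  set R : Bool := decide (2 * total ≥ length) with hR
  set t : Int := if R = true then length - total else total with ht
  have ht0 : 0 ≤ t := by
    rw [ht, hR]; by_cases h : 2 * total ≥ length <;> simp [h] <;> omega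
  have ht2 : 2 * t ≤ length := by
    rw [ht, hR]; by_cases h : 2 * total ≥ length <;> simp [h] <;> omega
  have htmin : t = min total (length - total) := by
    rw [ht, hR]; by_cases h : 2 * total ≥ length <;> simp [h] <;> omega
  by_cases ht1 : t ≥ 1
  · set intervalB : Int :=
      (if t ≤ 1 then 0
        else if mode = "max_interval" then PySem.Int.floordiv (length - 1) (t - 1)
        else min (PySem.Int.floordiv (length - 1) t + 1) (PySem.Int.floordiv (length - 1) (t - 1)))
      with hintervalB
    have hintEq :
        (if t = 1 then (0 : Int)
          else
            if mode = "max_interval" then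
              (PySem.List.max? ((PySem.List.pyRange 0 length 1).filter
                (fun i => decide (i * (t - 1) + 1 ≤ length) &&
                  (decide ((i + 1) * (t - 1) + 1 > length) || decide (i * t + 1 > length))))
                (fun x => x)).getD 0
            else if mode = "min_interval" then
              (PySem.List.min? ((PySem.List.pyRange 0 length 1).filter
                (fun i => decide (i * (t - 1) + 1 ≤ length) &&
                  (decide ((i + 1) * (t - 1) + 1 > length) || decide (i * t + 1 > length))))
                (fun x => x)).getD 0
            else 0) = intervalB := by
      by_cases hteq : t = 1
      · simp [hteq, hintervalB]
      · have ht2' : 2 ≤ t := by omega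
        have hmm := hmode (by omega)
        rw [if_neg hteq, hintervalB, if_neg (by omega : ¬ t ≤ 1)]
        rcases hmm with hm | hm
        · rw [hm, if_pos rfl]
          rw [interval_max_eq length t ht2' ht2]; rfl
        · rw [hm]
          have hne : ¬ (("min_interval" : String) = "max_interval") := by decide
          simp only [if_neg hne]
          rw [interval_min_eq length t ht2' ht2]; rfl
    rw [hintEq]
    simp only [if_pos ht1]
    have hint0 : 0 ≤ intervalB := by
      rw [hintervalB]
      by_cases hle : t ≤ 1
      · simp [hle]
      · have hb1 : (0:Int) < t - 1 := by omega
        have hb2 : (0:Int) < t := by omega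
        have g1 : 0 ≤ PySem.Int.floordiv (length - 1) (t - 1) := by
          rw [PySem.Int.le_floordiv_iff_mul_le hb1]; nlinarith
        have g2 : 0 ≤ PySem.Int.floordiv (length - 1) t := by
          rw [PySem.Int.le_floordiv_iff_mul_le hb2]; nlinarith
        by_cases hm : mode = "max_interval" <;> simp [hle, hm] <;> omega
    have hinner : intervalB * (t - 1) + 1 ≤ length := by
      rw [hintervalB]
      by_cases hle : t ≤ 1
      · have hte : t = 1 := by omega
        simp [hte]; omega
      · have hb1 : (0:Int) < t - 1 := by omega
        have g1 : PySem.Int.floordiv (length - 1) (t - 1) * (t - 1) ≤ length - 1 :=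
          (PySem.Int.le_floordiv_iff_mul_le hb1).mp le_rfl
        by_cases hm : mode = "max_interval"
        · simp only [if_neg hle, if_pos hm]; omega
        · simp only [if_neg hle, if_neg hm]
          have hmin_le : min (PySem.Int.floordiv (length - 1) t + 1)
              (PySem.Int.floordiv (length - 1) (t - 1)) ≤ PySem.Int.floordiv (length - 1) (t - 1) :=
            min_le_right _ _
          nlinarith [mul_le_mul_of_nonneg_right hmin_le (by omega : (0:Int) ≤ t - 1)]
    have hleft0 : 0 ≤ PySem.Int.floordiv (length - (intervalB * (t - 1) + 1)) 2 := by
      rw [PySem.Int.le_floordiv_iff_mul_le (by omega : (0:Int) < 2)]; omega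
    obtain ⟨n, hn⟩ : ∃ n : Nat, t = (n : Int) := ⟨t.toNat, (Int.toNat_of_nonneg ht0).symm⟩
    rw [hn] at hleft0 ⊢
    rw [fold_set_eq_indicator length (PySem.Int.floordiv (length - (intervalB * ((n : Int) - 1) + 1)) 2)
      intervalB hleft0 hint0 n]
    exact flip_eq_membership _ length R
  · have hte : t = 0 := by omega
    simp only [if_neg ht1]
    rw [hte]
    have hbase : PySem.List.pyRepeat ([0] : List Int) length
        = (PySem.List.pyRange 0 length 1).map (fun j => if j ∈ ([] : List Int) then (1:Int) else 0) := by
      simp only [List.not_mem_nil, if_false]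
      rw [PySem.List.pyRepeat_singleton, List.map_const']
      simp [PySem.List.length_pyRange_one]
    rw [PySem.List.pyRange_one_eq_nil (le_refl (0:Int)), List.map_nil, hbase]
    exact flip_eq_membership [] length R
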